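-- pv_equiv track=rewrite | github.com/rowanrogers/aoc2021 | day17.py | check_hits_x_y
-- ===== SOURCE A (Python) =====
-- def check_hits_x_y(velocity_x, target_x, velocity_y, target_y):
--
--     while True:
--         target_y = [y - velocity_y for y in target_y]
--         velocity_y -= 1
--
--         target_x = [y - velocity_x for y in target_x]
--         velocity_x = max(0, velocity_x - 1)
--
--         if (0 in target_x) and (0 in target_y):
--             return "hit"
--         elif (min(target_y) > 0) or (max(target_x) < 0):
--             return "miss"
--
--         continue
-- ===== SOURCE B (Python) =====
-- def check_hits_x_y(velocity_x, target_x, velocity_y, target_y):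
--     # Track the scalar probe position instead of shifting the whole target lists
--     # each step; membership via hash sets, miss bounds precomputed once.
--     ys_min = min(target_y)
--     xs_max = max(target_x)
--     xs_set = set(target_x)
--     ys_set = set(target_y)
--     px = py = 0
--     while True:
--         px += velocity_x
--         py += velocity_y
--         velocity_y -= 1
--         velocity_x = max(0, velocity_x - 1)
--         if px in xs_set and py in ys_set:
--             return "hit"
--         if ys_min > py or xs_max < px:
--             return "miss"
-- ===== Notes on version B (the rewrite author's own statement) =====
-- stated objective: faster
-- what changed: B tracks the scalar probe position (px, py) against precomputed min/max bounds and hash sets instead of rebuilding both shifted target lists and scanning them for membership/min/max on every step.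
-- outside the precondition, e.g. on check_hits_x_y(5, [], 3, [10, 20]): A returns 'miss', B raises ValueError
import Mathlib
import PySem

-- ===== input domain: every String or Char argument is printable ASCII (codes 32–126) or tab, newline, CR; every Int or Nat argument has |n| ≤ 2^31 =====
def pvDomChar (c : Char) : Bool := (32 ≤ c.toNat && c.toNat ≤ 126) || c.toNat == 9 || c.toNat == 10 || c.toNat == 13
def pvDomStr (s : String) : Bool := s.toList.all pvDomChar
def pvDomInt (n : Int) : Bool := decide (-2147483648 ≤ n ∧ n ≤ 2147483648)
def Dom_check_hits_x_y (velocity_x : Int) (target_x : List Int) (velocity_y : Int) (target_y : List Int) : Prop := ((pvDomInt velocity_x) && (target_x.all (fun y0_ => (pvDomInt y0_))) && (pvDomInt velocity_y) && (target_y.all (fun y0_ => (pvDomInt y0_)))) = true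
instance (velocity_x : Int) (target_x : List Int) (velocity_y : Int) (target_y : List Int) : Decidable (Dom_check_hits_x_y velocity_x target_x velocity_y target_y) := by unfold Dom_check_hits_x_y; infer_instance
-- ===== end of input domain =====

-- B replaces A's per-step rebuilding and rescanning of both shifted target lists by a
-- scalar probe position checked against precomputed min/max bounds and sets (equivalence
-- proved on nonempty target lists; elsewhere Python raises ValueError, see Pre_).

-- min(l) for a nonempty list, 1 (an arbitrary positive default) for []: used only as a
-- termination measure for the ports' loops, never in their results.
def pvMinD (l : List Int) : Int :=
  match PySem.List.min? l (fun y => y) with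
  | some v => v
  | none => 1

-- cited by the termination proofs below
theorem pvFoldlMinSub (t : List Int) (a c : Int) :
    (t.map (fun y => y - c)).foldl min (a - c) = t.foldl min a - c := by
  induction t generalizing a with
  | nil => simp
  | cons x t ih => simpa [min_sub_sub_right] using ih (min a x)

theorem pvMin?MapSub (ys : List Int) (c : Int) :
    PySem.List.min? (ys.map (fun t => t - c)) (fun y => y)
      = (PySem.List.min? ys (fun y => y)).map (fun v => v - c) := by
  cases ys with
  | nil => simp [PySem.List.min?]
  | cons x t => simp [PySem.List.min?_id_cons, pvFoldlMinSub]

theorem pvMinD_eq {l : List Int} {v : Int}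
    (h : PySem.List.min? l (fun y => y) = some v) : pvMinD l = v := by
  simp [pvMinD, h]

-- attach-elimination, cited by port A's decreasing_by chain
theorem pvAttachMap (l : List Int) (c : Int) :
    List.map (fun x : {x // x ∈ l} => (x : Int) - c) l.attach = l.map (fun t => t - c) := by
  simp

-- shifting a list shifts its minimum, cited by port A's decreasing_by
theorem pvMinShift (target_y : List Int) (velocity_y m : Int)
    (hm : PySem.List.min? (target_y.map (fun t => t - velocity_y)) (fun y => y) = some m) :
    PySem.List.min? target_y (fun y => y) = some (m + velocity_y) := by
  have hmap := pvMin?MapSub target_y velocity_y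
  rw [hm] at hmap
  cases hmin : PySem.List.min? target_y (fun y => y) with
  | none => rw [hmin] at hmap; simp at hmap
  | some v =>
    rw [hmin, Option.map_some] at hmap
    rw [Option.some.inj hmap, Int.sub_add_cancel]

-- cited by port A's decreasing_by
theorem pvDecA (velocity_y : Int) (target_y : List Int) (m : Int)
    (hm : PySem.List.min? (List.map (fun x : {x // x ∈ target_y} => (x : Int) - velocity_y) target_y.attach) (fun y => y) = some m)
    (hmle : ¬ m > 0) :
    Prod.Lex (· < ·) (· < ·)
      ((velocity_y - 1 + 1).toNat,
        (1 - pvMinD (List.map (fun x : {x // x ∈ target_y} => (x : Int) - velocity_y) target_y.attach)).toNat)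
      ((velocity_y + 1).toNat, (1 - pvMinD target_y).toNat) := by
  rw [Int.sub_add_cancel]
  rcases Int.lt_or_le velocity_y 0 with hneg | hpos
  · have hm2 : PySem.List.min? (target_y.map (fun t => t - velocity_y)) (fun y => y) = some m := by
      rw [← pvAttachMap]; exact hm
    have hold := pvMinShift target_y velocity_y m hm2
    rw [pvMinD_eq hm, pvMinD_eq hold]
    apply Prod.Lex.right'
    · exact Int.toNat_le_toNat (le_of_lt (lt_add_one _))
    · apply (Int.toNat_lt_toNat ?_).2
      · exact sub_lt_sub_left (add_lt_iff_neg_left.2 hneg) 1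
      · exact sub_pos.2 (lt_trans (add_neg_of_nonpos_of_neg (not_lt.1 hmle) hneg) one_pos)
  · apply Prod.Lex.left
    exact (Int.toNat_lt_toNat (Int.lt_add_one_iff.2 hpos)).2 (lt_add_one _)

-- cited by port B's decreasing_by
theorem pvDecB (velocity_x velocity_y px py ys_min xs_max : Int)
    (h : ¬(ys_min > py + velocity_y ∨ xs_max < px + velocity_x)) :
    Prod.Lex (· < ·) (· < ·)
      ((velocity_y - 1 + 1).toNat, (1 - (ys_min - (py + velocity_y))).toNat)
      ((velocity_y + 1).toNat, (1 - (ys_min - py)).toNat) := by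
  rw [Int.sub_add_cancel]
  rcases Int.lt_or_le velocity_y 0 with hneg | hpos
  · have h1 : ys_min ≤ py + velocity_y := not_lt.1 (fun hc => h (Or.inl hc))
    have h2 : ys_min - py ≤ velocity_y := sub_le_iff_le_add'.2 h1
    apply Prod.Lex.right'
    · exact Int.toNat_le_toNat (le_of_lt (lt_add_one _))
    · apply (Int.toNat_lt_toNat ?_).2
      · exact sub_lt_sub_left (sub_lt_sub_left (add_lt_iff_neg_left.2 hneg) ys_min) 1
      · exact sub_pos.2 (lt_of_le_of_lt h2 (lt_trans hneg one_pos))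
  · apply Prod.Lex.left
    exact (Int.toNat_lt_toNat (Int.lt_add_one_iff.2 hpos)).2 (lt_add_one _)

-- ===== PORT A =====
def check_hits_x_y (velocity_x : Int) (target_x : List Int) (velocity_y : Int) (target_y : List Int) : String :=
  let ty := target_y.map (fun y => y - velocity_y)
  let vy := velocity_y - 1
  let tx := target_x.map (fun y => y - velocity_x)
  let vx := max 0 (velocity_x - 1)
  if (0 ∈ tx) ∧ (0 ∈ ty) then "hit"
  else
    match hm : PySem.List.min? ty (fun y => y) with
    | none => ""      -- min([]) raises ValueError in Python; excluded by Pre_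
    | some m =>
      if m > 0 then "miss"
      else
        match PySem.List.max? tx (fun y => y) with
        | none => ""  -- max([]) raises ValueError in Python; excluded by Pre_
        | some M =>
          if M < 0 then "miss"
          else check_hits_x_y vx tx vy ty
termination_by ((velocity_y + 1).toNat, (1 - pvMinD target_y).toNat)
decreasing_by
  rename_i hmle
  exact pvDecA velocity_y target_y m hm hmle

-- ===== PORT B =====
def pvProbeLoop (ys_min xs_max : Int) (xs_set ys_set : List Int)
    (velocity_x velocity_y px py : Int) : String :=
  let px' := px + velocity_x
  let py' := py + velocity_y
  let vy := velocity_y - 1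
  let vx := max 0 (velocity_x - 1)
  if px' ∈ xs_set ∧ py' ∈ ys_set then "hit"
  else if ys_min > py' ∨ xs_max < px' then "miss"
  else pvProbeLoop ys_min xs_max xs_set ys_set vx vy px' py'
termination_by ((velocity_y + 1).toNat, (1 - (ys_min - py)).toNat)
decreasing_by
  rename_i h
  exact pvDecB velocity_x velocity_y px py ys_min xs_max h

def check_hits_x_y_alt (velocity_x : Int) (target_x : List Int) (velocity_y : Int) (target_y : List Int) : String :=
  match PySem.List.min? target_y (fun y => y), PySem.List.max? target_x (fun y => y) with
  | some ys_min, some xs_max =>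
      pvProbeLoop ys_min xs_max (PySem.Set.ofList target_x) (PySem.Set.ofList target_y)
        velocity_x velocity_y 0 0
  | _, _ => ""      -- min()/max() of an empty list raises ValueError; excluded by Pre_

-- ===== PRECONDITION & SPEC =====
-- Pre_ excludes empty target lists: there Python A raises ValueError (min/max of []),
-- except in the accidental corner where the y-miss short-circuit fires before max([])
-- is evaluated; B raises ValueError on all of them.
def Pre_check_hits_x_y (velocity_x : Int) (target_x : List Int) (velocity_y : Int) (target_y : List Int) : Prop :=
  target_x ≠ [] ∧ target_y ≠ []
instance (velocity_x : Int) (target_x : List Int) (velocity_y : Int) (target_y : List Int) : Decidable (Pre_check_hits_x_y velocity_x target_x velocity_y target_y) := by unfold Pre_check_hits_x_y; infer_instance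

def pvWitness_check_hits_x_y : Int × List Int × Int × List Int := (6, [10, 11, 12], 2, [-8, -7, -6])

def Spec_check_hits_x_y (velocity_x : Int) (target_x : List Int) (velocity_y : Int) (target_y : List Int) (out : String) : Prop := out = check_hits_x_y_alt velocity_x target_x velocity_y target_y
instance (velocity_x : Int) (target_x : List Int) (velocity_y : Int) (target_y : List Int) (out : String) : Decidable (Spec_check_hits_x_y velocity_x target_x velocity_y target_y out) := by unfold Spec_check_hits_x_y; infer_instance

-- ===== CLAIM (what is proved, stated in full; the proofs are below) =====
def Claim_equal_check_hits_x_y : Prop := ∀ (velocity_x : Int) (target_x : List Int) (velocity_y : Int) (target_y : List Int), Dom_check_hits_x_y velocity_x target_x velocity_y target_y → Pre_check_hits_x_y velocity_x target_x velocity_y target_y → Spec_check_hits_x_y velocity_x target_x velocity_y target_y (check_hits_x_y velocity_x target_x velocity_y target_y)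

-- ===== LEMMAS AND PROOFS =====

theorem pvFoldlMaxSub (t : List Int) (a c : Int) :
    (t.map (fun y => y - c)).foldl max (a - c) = t.foldl max a - c := by
  induction t generalizing a with
  | nil => simp
  | cons x t ih => simpa [max_sub_sub_right] using ih (max a x)

theorem pvMax?MapSub (xs : List Int) (c : Int) :
    PySem.List.max? (xs.map (fun t => t - c)) (fun y => y)
      = (PySem.List.max? xs (fun y => y)).map (fun v => v - c) := by
  cases xs with
  | nil => simp [PySem.List.max?]
  | cons x t => simp [PySem.List.max?_id_cons, pvFoldlMaxSub]

theorem pvLoopEq (xs ys : List Int) (ys_min xs_max : Int)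
    (hmin : PySem.List.min? ys (fun y => y) = some ys_min)
    (hmax : PySem.List.max? xs (fun y => y) = some xs_max)
    (vx vy px py : Int) :
    pvProbeLoop ys_min xs_max (PySem.Set.ofList xs) (PySem.Set.ofList ys) vx vy px py
      = check_hits_x_y vx (xs.map (fun t => t - px)) vy (ys.map (fun t => t - py)) := by
  have e1 : ∀ c d : Int, (List.map (fun t => t - c) xs).map (fun y => y - d) = xs.map (fun t => t - (c + d)) := by
    intro c d; simp [List.map_map]; intro a _; ring
  have e2 : ∀ c d : Int, (List.map (fun t => t - c) ys).map (fun y => y - d) = ys.map (fun t => t - (c + d)) := by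
    intro c d; simp [List.map_map]; intro a _; ring
  fun_induction pvProbeLoop ys_min xs_max (PySem.Set.ofList xs) (PySem.Set.ofList ys) vx vy px py with
  | case1 vx vy px py px' py' hhit =>
    rw [check_hits_x_y, e1, e2]
    rw [if_pos ?_]
    obtain ⟨h1, h2⟩ := hhit
    rw [PySem.Set.mem_ofList] at h1 h2
    refine ⟨?_, ?_⟩ <;> simp only [List.mem_map]
    · exact ⟨px + vx, h1, by ring⟩
    · exact ⟨py + vy, h2, by ring⟩
  | case2 vx vy px py px' py' hhit hmiss =>
    have hpx : px' = px + vx := rfl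
    have hpy : py' = py + vy := rfl
    rw [check_hits_x_y, e1, e2]
    rw [if_neg ?_]
    · rw [pvMin?MapSub, hmin]
      simp only [Option.map_some]
      by_cases hg : ys_min - (py + vy) > 0
      · rw [if_pos hg]
      · rw [if_neg hg, pvMax?MapSub, hmax]
        simp only [Option.map_some]
        rw [if_pos (by omega)]
    · rintro ⟨c1, c2⟩
      simp only [List.mem_map] at c1 c2
      obtain ⟨a, ha, ha0⟩ := c1
      obtain ⟨b, hb, hb0⟩ := c2
      have hax : px' ∈ xs := by rw [hpx]; have : a = px + vx := by omega
                                exact this ▸ ha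
      have hby : py' ∈ ys := by rw [hpy]; have : b = py + vy := by omega
                                exact this ▸ hb
      exact absurd ⟨(PySem.Set.mem_ofList _ _).2 hax, (PySem.Set.mem_ofList _ _).2 hby⟩ hhit
  | case3 vx vy px py px' py' vy' vx' hhit hmiss ih =>
    have hpx : px' = px + vx := rfl
    have hpy : py' = py + vy := rfl
    rw [check_hits_x_y, e1, e2]
    rw [if_neg ?_]
    · rw [pvMin?MapSub, hmin]
      simp only [Option.map_some]
      rw [if_neg (by omega), pvMax?MapSub, hmax]
      simp only [Option.map_some]
      rw [if_neg (by omega)]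
      rw [hpx, hpy] at ih
      exact ih
    · rintro ⟨c1, c2⟩
      simp only [List.mem_map] at c1 c2
      obtain ⟨a, ha, ha0⟩ := c1
      obtain ⟨b, hb, hb0⟩ := c2
      have hax : px' ∈ xs := by rw [hpx]; have : a = px + vx := by omega
                                exact this ▸ ha
      have hby : py' ∈ ys := by rw [hpy]; have : b = py + vy := by omega
                                exact this ▸ hb
      exact absurd ⟨(PySem.Set.mem_ofList _ _).2 hax, (PySem.Set.mem_ofList _ _).2 hby⟩ hhit

theorem check_hits_x_y_spec : Claim_equal_check_hits_x_y := by
  intro vx xs vy ys _ hpre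
  obtain ⟨hx, hy⟩ := hpre
  unfold Spec_check_hits_x_y
  cases hmin : PySem.List.min? ys (fun y => y) with
  | none => exact absurd ((PySem.List.min?_eq_none_iff _ _).1 hmin) hy
  | some ys_min =>
    cases hmax : PySem.List.max? xs (fun y => y) with
    | none => exact absurd ((PySem.List.max?_eq_none_iff _ _).1 hmax) hx
    | some xs_max =>
      have h := pvLoopEq xs ys ys_min xs_max hmin hmax vx vy 0 0
      simp only [sub_zero, List.map_id'] at h
      rw [check_hits_x_y_alt, hmin, hmax]
      exact h.symm
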